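-- pv_equiv track=rewrite | github.com/RExBench2025/aider | benchmark/tests.py | remove_patches_to_tests
-- ===== SOURCE A (Python) =====
-- def remove_patches_to_tests(model_patch):
--     """
--     Remove any changes to the tests directory from the provided patch.
--     This is to ensure that the model_patch does not disturb the repo's
--     tests when doing acceptance testing with the `test_patch`.
--     """
--     lines = model_patch.splitlines(keepends=True)
--     filtered_lines = []
--     in_tests = False
--     for line in lines:
--         if line.startswith("diff --git a/tests/"):
--             in_tests = True
--         elif line.startswith("diff --git "):
--             in_tests = False
--
--         if not in_tests:
--             filtered_lines.append(line)
--
--     return "".join(filtered_lines)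
-- ===== SOURCE B (Python) =====
-- def remove_patches_to_tests(model_patch):
--     """
--     Remove any changes to the tests directory from the provided patch.
--     Group the patch into a preamble block plus one block per 'diff --git '
--     header, then drop the blocks whose header targets a/tests/.
--     """
--     lines = model_patch.splitlines(keepends=True)
--     blocks = []
--     current = []
--     for line in lines:
--         if line.startswith("diff --git "):
--             blocks.append(current)
--             current = [line]
--         else:
--             current.append(line)
--     blocks.append(current)
--     kept = [b for b in blocks if not (b and b[0].startswith("diff --git a/tests/"))]
--     return "".join("".join(b) for b in kept)
-- ===== Notes on version B (the rewrite author's own statement) =====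
-- stated objective: alternative
-- what changed: Replaces the stateful in_tests flag loop with a group-then-filter decomposition: split the patch into a preamble block plus one block per 'diff --git ' header, drop blocks headed by 'diff --git a/tests/', and join the rest.
import Mathlib
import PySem

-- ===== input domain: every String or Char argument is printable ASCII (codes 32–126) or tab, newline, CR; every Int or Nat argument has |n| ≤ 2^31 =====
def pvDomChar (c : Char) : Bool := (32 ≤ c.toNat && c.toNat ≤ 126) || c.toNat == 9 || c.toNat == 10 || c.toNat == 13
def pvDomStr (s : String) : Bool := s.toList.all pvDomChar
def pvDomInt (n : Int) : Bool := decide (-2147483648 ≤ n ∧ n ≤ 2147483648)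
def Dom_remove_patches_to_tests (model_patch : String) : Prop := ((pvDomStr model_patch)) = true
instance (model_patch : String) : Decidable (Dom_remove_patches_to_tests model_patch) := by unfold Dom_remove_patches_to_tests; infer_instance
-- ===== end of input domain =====

-- B replaces A's stateful in_tests flag with a group-into-blocks-then-filter decomposition (same cost).

-- s.splitlines(keepends=True), hand-ported: exact on the stated domain, whose only
-- line-break characters are '\n', '\r' and the pair '\r\n'.
def slk : List Char → List (List Char)
  | [] => []
  | '\r' :: '\n' :: rest => ['\r', '\n'] :: slk rest
  | '\n' :: rest => ['\n'] :: slk rest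
  | '\r' :: rest => ['\r'] :: slk rest
  | c :: rest =>
    match slk rest with
    | [] => [[c]]
    | l :: ls => (c :: l) :: ls

-- line.startswith(p), over List Char (exact: startswith is prefix test)
def pfxTests (l : List Char) : Bool := "diff --git a/tests/".toList.isPrefixOf l
def pfxDiff (l : List Char) : Bool := "diff --git ".toList.isPrefixOf l

-- ===== PORT A =====
def remove_patches_to_tests (model_patch : String) : String :=
  let lines := slk model_patch.toList
  let st := lines.foldl
    (fun (st : Bool × List (List Char)) line =>
      let in_tests := if pfxTests line then true
        else if pfxDiff line then false else st.1
      (in_tests, if in_tests = false then st.2 ++ [line] else st.2))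
    (false, [])
  String.ofList st.2.flatten

-- ===== PORT B =====
def splitBlocks (current : List (List Char)) : List (List Char) → List (List (List Char))
  | [] => [current]
  | l :: ls =>
    if pfxDiff l then current :: splitBlocks [l] ls
    else splitBlocks (current ++ [l]) ls

def keepBlock (b : List (List Char)) : Bool :=
  match b with
  | [] => true
  | l :: _ => !pfxTests l

def remove_patches_to_tests_alt (model_patch : String) : String :=
  let lines := slk model_patch.toList
  let blocks := splitBlocks [] lines
  String.ofList (((blocks.filter keepBlock).map List.flatten).flatten)

-- ===== PRECONDITION & SPEC =====
def Spec_remove_patches_to_tests (model_patch : String) (out : String) : Prop := out = remove_patches_to_tests_alt model_patch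
instance (model_patch : String) (out : String) : Decidable (Spec_remove_patches_to_tests model_patch out) := by unfold Spec_remove_patches_to_tests; infer_instance

-- ===== CLAIM (what is proved, stated in full; the proofs are below) =====
def Claim_equal_remove_patches_to_tests : Prop := ∀ (model_patch : String), Dom_remove_patches_to_tests model_patch → Spec_remove_patches_to_tests model_patch (remove_patches_to_tests model_patch)

-- ===== LEMMAS AND PROOFS =====

-- A's loop, written as structural recursion returning the kept lines.
def runA : Bool → List (List Char) → List (List Char)
  | _, [] => []
  | t, l :: ls =>
    let t' := if pfxTests l then true else if pfxDiff l then false else t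
    (if t' = false then [l] else []) ++ runA t' ls

lemma foldlA_eq (ls : List (List Char)) : ∀ (t : Bool) (acc : List (List Char)),
    (ls.foldl
      (fun (st : Bool × List (List Char)) line =>
        let in_tests := if pfxTests line then true
          else if pfxDiff line then false else st.1
        (in_tests, if in_tests = false then st.2 ++ [line] else st.2))
      (t, acc)).2 = acc ++ runA t ls := by
  induction ls with
  | nil => intro t acc; simp [runA]
  | cons l ls ih =>
    intro t acc
    simp only [List.foldl_cons, runA]
    rw [ih]
    split_ifs <;> simp

lemma tests_imp_diff {l : List Char} (h : pfxTests l = true) : pfxDiff l = true := by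
  rw [pfxTests, List.isPrefixOf_iff_prefix] at h
  rw [pfxDiff, List.isPrefixOf_iff_prefix]
  exact List.IsPrefix.trans (by decide) h

lemma main_lemma (ls : List (List Char)) : ∀ (current : List (List Char)) (t : Bool),
    t = !keepBlock current →
    ((splitBlocks current ls).filter keepBlock).flatten
      = (if keepBlock current then current else []) ++ runA t ls := by
  induction ls with
  | nil =>
    intro current t ht
    simp only [splitBlocks, runA, List.append_nil]
    by_cases h : keepBlock current = true <;> simp [List.filter, h]
  | cons l ls ih =>
    intro current t ht
    simp only [splitBlocks, runA]
    by_cases hd : pfxDiff l = true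
    · have ht' : (if pfxTests l = true then true else if pfxDiff l = true then false else t)
          = !keepBlock [l] := by
        simp only [keepBlock]; cases h : pfxTests l <;> simp [hd]
      rw [if_pos hd, List.filter_cons, ht']
      by_cases hk : keepBlock current = true
      · rw [if_pos hk, if_pos hk, List.flatten_cons, ih [l] _ rfl]
        cases h : keepBlock [l] <;> simp
      · rw [if_neg hk, if_neg hk, ih [l] _ rfl]
        cases h : keepBlock [l] <;> simp
    · have hnt : pfxTests l = false := by
        cases h : pfxTests l
        · rfl
        · exact absurd (tests_imp_diff h) (by simp [hd])
      have hdb : pfxDiff l = false := by simpa using hd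
      have hkeep : keepBlock (current ++ [l]) = keepBlock current := by
        cases current with
        | nil => simp [keepBlock, hnt]
        | cons a as => simp [keepBlock]
      rw [if_neg hd, ih (current ++ [l]) t (by rw [hkeep]; exact ht)]
      simp only [hnt, hdb, Bool.false_eq_true, if_false, hkeep]
      by_cases hk : keepBlock current = true
      · have htf : t = false := by rw [ht, hk]; rfl
        simp [hk, htf]
      · have htt : t = true := by rw [ht]; simp only [Bool.not_eq_true] at hk; rw [hk]; rfl
        simp [hk, htt]

lemma flatten_map_flatten (l : List (List (List Char))) :
    (l.map List.flatten).flatten = l.flatten.flatten := by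
  induction l with
  | nil => rfl
  | cons a as ih => simp [ih]

-- ===== VERDICT (by name: the statement is the Claim_ definition above) =====
theorem remove_patches_to_tests_spec : Claim_equal_remove_patches_to_tests := by
  intro s _
  unfold Spec_remove_patches_to_tests remove_patches_to_tests remove_patches_to_tests_alt
  simp only
  rw [foldlA_eq, flatten_map_flatten,
    main_lemma (slk s.toList) [] false (by simp [keepBlock])]
  simp [keepBlock]
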